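-- pv_equiv track=rewrite | github.com/yehoon17/programmers | 신규_아이디_추천.py | solution
-- ===== SOURCE A (Python) =====
-- def solution(new_id):
--     answer = ''
--     li = []
--     isStart = True
--     isPeriod = False
--     size = 0
--     x = '~!@#$%^&*()=+[{]}:?,<>/'
--     for c in new_id:
--         if size > 14:
--             break
--         if c in x:
--             continue
--         if isStart:
--             if c == '.':
--                 continue
--             else:
--                 isStart = False
--         if c == '.':
--             if isPeriod:
--                 continue
--             else:
--                 isPeriod = True
--         else:
--             isPeriod = False
--         li.append(c.lower())
--         size+=1
--
--     if not li:
--         return 'aaa'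
--
--     if li[-1] == '.':
--         li.pop()
--         size-=1
--
--     if not li:
--         return 'aaa'
--
--     while(size<3):
--         li.append(li[-1])
--         size+=1
--
--     for c in li:
--         answer+=c
--
--     return answer
-- ===== SOURCE B (Python) =====
-- import re
--
-- def solution(new_id):
--     s = new_id.lower()
--     s = re.sub(r'[~!@#$%^&*()=+\[{\]}:?,<>/]', '', s)
--     s = re.sub(r'\.+', '.', s)
--     s = s.lstrip('.')
--     s = s[:15].rstrip('.')
--     if not s:
--         return 'aaa'
--     while len(s) < 3:
--         s += s[-1]
--     return s
-- ===== Notes on version B (the rewrite author's own statement) =====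
-- stated objective: idiomatic
-- what changed: A's single stateful character loop (isStart/isPeriod flags, size counter, early break, then pop/pad fix-ups) is replaced by the canonical multi-pass pipeline: lowercase, delete exactly the blacklisted characters, collapse each run of periods via re.sub, strip leading periods, truncate to 15, strip trailing periods, then pad to length 3.
import Mathlib
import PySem

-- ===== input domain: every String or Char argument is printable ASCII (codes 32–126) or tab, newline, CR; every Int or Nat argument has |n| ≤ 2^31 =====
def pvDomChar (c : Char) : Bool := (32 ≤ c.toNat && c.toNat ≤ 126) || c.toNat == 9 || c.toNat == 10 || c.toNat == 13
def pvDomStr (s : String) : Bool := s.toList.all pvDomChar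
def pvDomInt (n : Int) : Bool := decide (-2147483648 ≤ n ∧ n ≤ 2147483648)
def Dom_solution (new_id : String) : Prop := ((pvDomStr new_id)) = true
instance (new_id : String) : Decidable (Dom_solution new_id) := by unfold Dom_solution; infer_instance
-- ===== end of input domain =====

-- B replaces A's single stateful character loop (flags isStart/isPeriod, size counter, early break)
-- by the canonical multi-pass pipeline: lowercase, drop blacklisted chars, collapse period runs,
-- strip leading periods, truncate to 15, strip trailing periods, pad to length 3 — objective: idiomatic.

-- ===== PORT A =====
-- x = '~!@#$%^&*()=+[{]}:?,<>/' as its character list (the same literal is the blacklist of both programs)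
def pvForb : List Char := ['~', '!', '@', '#', '$', '%', '^', '&', '*', '(', ')', '=', '+', '[', '{', ']', '}', ':', '?', ',', '<', '>', '/']

-- A's for-loop: state (li, isStart, isPeriod, size), break once size > 14
def solLoopA : List Char → List Char → Bool → Bool → Int → List Char
  | [], li, _, _, _ => li
  | c :: cs, li, isStart, isPeriod, size =>
    if size > 14 then li
    else if pvForb.contains c then solLoopA cs li isStart isPeriod size
    else if isStart && (c == '.') then solLoopA cs li isStart isPeriod size
    else if c == '.' then
      if isPeriod then solLoopA cs li false true size
      else solLoopA cs (li ++ [PySem.Chars.lowerChar c]) false true (size + 1)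
    else solLoopA cs (li ++ [PySem.Chars.lowerChar c]) false false (size + 1)

-- while size < 3: li.append(li[-1])  (li is nonempty at every call site, so the default is never read)
def padA (li : List Char) (size : Int) : List Char :=
  if size < 3 then padA (li ++ [li.getLast?.getD 'a']) (size + 1) else li
  termination_by (3 - size).toNat
  decreasing_by omega

def solution (new_id : String) : String :=
  let li := solLoopA new_id.toList [] true false 0
  if li = [] then "aaa"
  else
    let li2 := if li.getLast? = some '.' then li.dropLast else li  -- if li[-1] == '.': li.pop()
    if li2 = [] then "aaa"
    else (padA li2 (li2.length : Int)).foldl (fun a c => a.push c) ""  -- for c in li: answer += c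

-- ===== PORT B =====
-- re.sub(r'\.+', '.', s): each maximal run of '.' becomes a single '.' (hand port, exact for this pattern)
def collapseDots : List Char → List Char
  | [] => []
  | c :: cs =>
    if c == '.' then '.' :: collapseDots (cs.dropWhile (· == '.'))
    else c :: collapseDots cs
  termination_by l => l.length
  decreasing_by
  · have := List.length_dropWhile_le (· == '.') cs; simp; omega
  · simp

-- while len(s) < 3: s += s[-1]  (s is nonempty at every call site, so the default is never read)
def padB (l : List Char) : List Char :=
  if l.length < 3 then padB (l ++ [l.getLast?.getD 'a']) else l
  termination_by 3 - l.length
  decreasing_by simp; omega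

def solution_alt (new_id : String) : String :=
  let s := (PySem.Str.lower new_id).toList                -- s = new_id.lower()
  let s := s.filter (fun c => !pvForb.contains c)         -- re.sub('[blacklist]', '', s): a filter
  let s := collapseDots s                                 -- re.sub(r'\.+', '.', s)
  let s := s.dropWhile (· == '.')                         -- s.lstrip('.')
  let s := s.take 15                                      -- s[:15]
  let s := (s.reverse.dropWhile (· == '.')).reverse       -- .rstrip('.')
  if s = [] then "aaa" else String.ofList (padB s)

-- ===== PRECONDITION & SPEC =====
def Spec_solution (new_id : String) (out : String) : Prop := out = solution_alt new_id
instance (new_id : String) (out : String) : Decidable (Spec_solution new_id out) := by unfold Spec_solution; infer_instance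

-- ===== CLAIM (what is proved, stated in full; the proofs are below) =====
def Claim_equal_solution : Prop := ∀ (new_id : String), Dom_solution new_id → Spec_solution new_id (solution new_id)

-- ===== LEMMAS AND PROOFS =====

-- the character kept by both programs
def pvKeep (c : Char) : Bool := !pvForb.contains c

-- the common intermediate stream: hN = normal state, hS = "skip dots" state
-- (hS = A's states isStart/isPeriod, and B's collapse + lstrip)
mutual
def hN : List Char → List Char
  | [] => []
  | c :: cs => if c == '.' then '.' :: hS cs else c :: hN cs
def hS : List Char → List Char
  | [] => []
  | c :: cs => if c == '.' then hS cs else c :: hN cs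
end

-- no two adjacent dots
def noDD : List Char → Bool
  | a :: b :: r => !(a == '.' && b == '.') && noDD (b :: r)
  | _ => true

-- the filtered-and-lowered stream both programs reduce to
def pvL (cs : List Char) : List Char := (cs.filter pvKeep).map PySem.Chars.lowerChar

lemma upper_bounds (c : Char) (h : PySem.Chars.isupper c = true) : 65 ≤ c.toNat ∧ c.toNat ≤ 90 := by
  simp [PySem.Chars.isupper] at h
  exact ⟨Nat.succ_le_of_lt h.1, h.2⟩

lemma forb_toNat (d : Char) (hd : d ∈ pvForb) :
    ¬(65 ≤ d.toNat ∧ d.toNat ≤ 90) ∧ ¬(97 ≤ d.toNat ∧ d.toNat ≤ 122) ∧ d ≠ '.' := by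
  fin_cases hd <;> simp

lemma lower_toNat (c : Char) (h : PySem.Chars.isupper c = true) :
    (PySem.Chars.lowerChar c).toNat = c.toNat + 32 := by
  obtain ⟨h1, h2⟩ := upper_bounds c h
  simp [PySem.Chars.lowerChar, h]
  rw [Char.toNat_ofNat, if_pos]
  simp [Nat.isValidChar]; omega

lemma char_eq_iff_toNat (a b : Char) : a = b ↔ a.toNat = b.toNat := by
  constructor
  · intro h; rw [h]
  · intro h; exact Char.ext (UInt32.toNat_inj.mp h)

lemma lowerChar_dot (c : Char) : (PySem.Chars.lowerChar c == '.') = (c == '.') := by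
  by_cases h : PySem.Chars.isupper c = true
  · obtain ⟨h1, h2⟩ := upper_bounds c h
    have hl := lower_toNat c h
    have d46 : ('.' : Char).toNat = 46 := by decide
    have hA : ¬ PySem.Chars.lowerChar c = '.' := by rw [char_eq_iff_toNat]; omega
    have hB : ¬ c = '.' := by rw [char_eq_iff_toNat]; omega
    simp [hA, hB]
  · simp [PySem.Chars.lowerChar, h]

lemma keep_lowerChar (c : Char) : pvKeep (PySem.Chars.lowerChar c) = pvKeep c := by
  by_cases h : PySem.Chars.isupper c = true
  · obtain ⟨h1, h2⟩ := upper_bounds c h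
    have hl := lower_toNat c h
    have k1 : pvForb.contains c = false := by
      have : ¬ c ∈ pvForb := fun hm => (forb_toNat c hm).1 ⟨h1, h2⟩
      simpa using this
    have k2 : pvForb.contains (PySem.Chars.lowerChar c) = false := by
      have : ¬ PySem.Chars.lowerChar c ∈ pvForb :=
        fun hm => (forb_toNat _ hm).2.1 ⟨by omega, by omega⟩
      simpa using this
    simp only [pvKeep]; rw [k1, k2]
  · simp [PySem.Chars.lowerChar, h]

lemma loopA_eq (cs : List Char) : ∀ li : List Char,
    (solLoopA cs li true false (li.length : Int) = li ++ (hS (pvL cs)).take (15 - li.length))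
  ∧ (solLoopA cs li false true (li.length : Int) = li ++ (hS (pvL cs)).take (15 - li.length))
  ∧ (solLoopA cs li false false (li.length : Int) = li ++ (hN (pvL cs)).take (15 - li.length)) := by
  induction cs with
  | nil => intro li; simp [solLoopA, pvL, hS, hN]
  | cons c cs ih =>
    intro li
    by_cases hbig : (li.length : Int) > 14
    · have h0 : 15 - li.length = 0 := by omega
      simp [solLoopA, hbig, h0]
    · have hlt : ∃ m, 15 - li.length = m + 1 := ⟨14 - li.length, by omega⟩
      obtain ⟨m, hm⟩ := hlt
      have hm' : 15 - (li ++ [PySem.Chars.lowerChar c]).length = m := by simp; omega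
      have hcast : ((li ++ [PySem.Chars.lowerChar c]).length : Int) = (li.length : Int) + 1 := by
        simp
      by_cases hk : pvForb.contains c
      · have hk' : c ∈ pvForb := by simpa using hk
        have hL : pvL (c :: cs) = pvL cs := by simp [pvL, pvKeep, hk']
        simp only [solLoopA, if_neg hbig, if_pos hk, hL]
        exact ih li
      · have hk' : ¬ c ∈ pvForb := by simpa using hk
        have hL : pvL (c :: cs) = PySem.Chars.lowerChar c :: pvL cs := by
          simp [pvL, pvKeep, hk']
        by_cases hdot : c == '.'
        · have hld : PySem.Chars.lowerChar c = '.' := by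
            have := lowerChar_dot c; rw [hdot] at this; simpa using this
          have hSs : hS (pvL (c :: cs)) = hS (pvL cs) := by
            rw [hL, hS, if_pos (by simp [hld])]
          have hNs : hN (pvL (c :: cs)) = '.' :: hS (pvL cs) := by
            rw [hL, hN, if_pos (by simp [hld])]
          refine ⟨?_, ?_, ?_⟩
          · simp only [solLoopA, if_neg hbig, if_neg hk, hdot, Bool.and_true, hSs]
            exact (ih li).1
          · simp only [solLoopA, if_neg hbig, if_neg hk, Bool.false_and, if_neg (by simp : ¬(false = true)), if_pos hdot, hSs]
            exact (ih li).2.1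
          · simp only [solLoopA, if_neg hbig, if_neg hk, Bool.false_and, if_neg (by simp : ¬(false = true)), if_pos hdot, hNs]
            rw [← hcast] at *
            have := (ih (li ++ [PySem.Chars.lowerChar c])).2.1
            rw [hcast] at this ⊢
            rw [this, hm, hm', hld]
            simp [List.take_succ_cons]
        · have hldn : ¬ (PySem.Chars.lowerChar c == '.') = true := by
            rw [lowerChar_dot]; simpa using hdot
          have hSs : hS (pvL (c :: cs)) = PySem.Chars.lowerChar c :: hN (pvL cs) := by
            rw [hL, hS, if_neg hldn]
          have hNs : hN (pvL (c :: cs)) = PySem.Chars.lowerChar c :: hN (pvL cs) := by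
            rw [hL, hN, if_neg hldn]
          have step : solLoopA cs (li ++ [PySem.Chars.lowerChar c]) false false ((li.length : Int) + 1)
              = (li ++ [PySem.Chars.lowerChar c]) ++ (hN (pvL cs)).take m := by
            rw [← hcast, ← hm']
            exact (ih (li ++ [PySem.Chars.lowerChar c])).2.2
          refine ⟨?_, ?_, ?_⟩
          · simp only [solLoopA, if_neg hbig, if_neg hk, hdot, Bool.and_false,
              if_neg (by simp : ¬(false = true)), hSs, step, hm]
            simp [List.take_succ_cons]
          · simp only [solLoopA, if_neg hbig, if_neg hk, Bool.false_and,
              if_neg (by simp : ¬(false = true)), if_neg hdot, hSs, step, hm]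
            simp [List.take_succ_cons]
          · simp only [solLoopA, if_neg hbig, if_neg hk, Bool.false_and,
              if_neg (by simp : ¬(false = true)), if_neg hdot, hNs, step, hm]
            simp [List.take_succ_cons]

lemma dropWhile_hS (l : List Char) : (hS l).dropWhile (· == '.') = hS l := by
  induction l with
  | nil => simp [hS]
  | cons c cs ih =>
    by_cases h : c == '.'
    · simp [hS, h, ih]
    · simp [hS, h]

lemma dropWhile_hN (l : List Char) : (hN l).dropWhile (· == '.') = hS l := by
  induction l with
  | nil => simp [hN, hS]
  | cons c cs ih =>
    by_cases h : c == '.'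
    · simp [hN, hS, h, dropWhile_hS]
    · simp [hN, hS, h]

lemma hS_eq_hN_dropWhile (l : List Char) : hS l = hN (l.dropWhile (· == '.')) := by
  induction l with
  | nil => simp [hS, hN]
  | cons c cs ih =>
    by_cases h : c == '.'
    · simp [hS, h, ih]
    · simp [hS, hN, h]

lemma collapseDots_eq_hN (l : List Char) : collapseDots l = hN l := by
  induction hl : l.length using Nat.strong_induction_on generalizing l with
  | _ n ih =>
    cases l with
    | nil => simp [collapseDots, hN]
    | cons c cs =>
      by_cases h : c == '.'
      · rw [collapseDots]
        simp only [h, if_pos]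
        rw [hN]
        simp only [h, if_pos]
        have hlen : (cs.dropWhile (· == '.')).length < n := by
          have := List.length_dropWhile_le (· == '.') cs
          simp at hl; omega
        rw [ih _ hlen _ rfl, ← hS_eq_hN_dropWhile]
      · rw [collapseDots, hN]
        simp only [h, if_neg, Bool.false_eq_true, not_false_iff]
        have hlen : cs.length < n := by simp at hl; omega
        rw [ih _ hlen _ rfl]

lemma noDD_cons (c : Char) (l : List Char) :
    noDD (c :: l) = true ↔ ((c = '.' → l.head? ≠ some '.') ∧ noDD l = true) := by
  cases l with
  | nil => simp [noDD]
  | cons d r =>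
    rw [noDD]
    simp only [List.head?, Bool.and_eq_true, Bool.not_eq_true', Bool.and_eq_false_iff]
    constructor
    · rintro ⟨h1, h2⟩
      refine ⟨?_, h2⟩
      intro hc hd
      simp [hc] at h1
      simp at hd
      simp [hd] at h1
    · rintro ⟨h1, h2⟩
      refine ⟨?_, h2⟩
      by_cases hc : c = '.'
      · have := h1 hc
        have hd : ¬ d = '.' := by intro hd; exact this (by simp [hd])
        simp [hd]
      · simp [hc]

lemma noDD_hNS (l : List Char) :
    noDD (hN l) = true ∧ noDD (hS l) = true ∧ (hS l).head? ≠ some '.' := by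
  induction l with
  | nil => simp [hN, hS, noDD]
  | cons c cs ih =>
    obtain ⟨ihN, ihS, ihH⟩ := ih
    by_cases h : c == '.'
    · refine ⟨?_, ?_, ?_⟩
      · rw [hN]; simp only [h, if_pos]
        rw [noDD_cons]
        exact ⟨fun _ => ihH, ihS⟩
      · rw [hS]; simp only [h, if_pos]; exact ihS
      · rw [hS]; simp only [h, if_pos]; exact ihH
    · have hc : ¬ c = '.' := by simpa using h
      refine ⟨?_, ?_, ?_⟩
      · rw [hN]; simp only [h, if_neg, Bool.false_eq_true, not_false_iff]
        rw [noDD_cons]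
        exact ⟨fun hc' => absurd hc' hc, ihN⟩
      · rw [hS]; simp only [h, if_neg, Bool.false_eq_true, not_false_iff]
        rw [noDD_cons]
        exact ⟨fun hc' => absurd hc' hc, ihN⟩
      · rw [hS]; simp only [h, if_neg, Bool.false_eq_true, not_false_iff]
        simp [hc]

lemma noDD_take (n : Nat) (l : List Char) (h : noDD l = true) : noDD (l.take n) = true := by
  induction l generalizing n with
  | nil => simp [noDD]
  | cons c cs ih =>
    cases n with
    | zero => simp [noDD]
    | succ m =>
      rw [List.take_succ_cons, noDD_cons]
      rw [noDD_cons] at h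
      refine ⟨?_, ih m h.2⟩
      intro hc hd
      apply h.1 hc
      cases cs with
      | nil => simp at hd
      | cons d r => cases m with
        | zero => simp at hd
        | succ k => simpa using hd

lemma noDD_concat_dot (s : List Char) (h : noDD (s ++ ['.']) = true) : s.getLast? ≠ some '.' := by
  induction s with
  | nil => simp
  | cons a s' ih =>
    rw [List.cons_append, noDD_cons] at h
    cases s' with
    | nil =>
      simp only [List.nil_append] at h
      have := h.1
      simp only [List.getLast?_singleton]
      intro hc
      simp at hc
      exact (this hc) (by simp)
    | cons b r =>
      have := ih h.2
      simpa [List.getLast?_cons_cons] using this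

lemma head_ne_dropWhile (s : List Char) (h : s.head? ≠ some '.') :
    s.dropWhile (· == '.') = s := by
  cases s with
  | nil => simp
  | cons a r =>
    have : ¬ a = '.' := fun ha => h (by simp [ha])
    simp [this]

lemma rstrip_eq (t : List Char) (h : noDD t = true) :
    (t.reverse.dropWhile (· == '.')).reverse =
      if t.getLast? = some '.' then t.dropLast else t := by
  induction t using List.reverseRecOn with
  | nil => simp
  | append_singleton s c _ =>
    rw [List.reverse_append]
    simp only [List.reverse_singleton, List.singleton_append]
    by_cases hc : c = '.'
    · subst hc
      have hlast := noDD_concat_dot s h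
      rw [List.dropWhile_cons]
      simp only [beq_self_eq_true, if_pos]
      rw [head_ne_dropWhile s.reverse (by rwa [List.head?_reverse])]
      simp
    · rw [List.dropWhile_cons]
      have : ¬ (c == '.') = true := by simpa using hc
      rw [if_neg this]
      simp [hc]

lemma pad_eq (l : List Char) : padA l (l.length : Int) = padB l := by
  rw [padA, padB]
  by_cases h : l.length < 3
  · have h' : (l.length : Int) < 3 := by exact_mod_cast h
    rw [if_pos h', if_pos h]
    have hc : (l.length : Int) + 1 = ((l ++ [l.getLast?.getD 'a']).length : Int) := by simp
    rw [hc]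
    exact pad_eq (l ++ [l.getLast?.getD 'a'])
  · have h' : ¬ (l.length : Int) < 3 := by exact_mod_cast h
    rw [if_neg h', if_neg h]
  termination_by 3 - l.length
  decreasing_by simp; omega

lemma foldl_push (l : List Char) (s : String) :
    l.foldl (fun a c => a.push c) s = s ++ String.ofList l := by
  induction l generalizing s with
  | nil => simp
  | cons c cs ih =>
    simp only [List.foldl, ih]
    apply String.toList_inj.mp; simp

-- ===== VERDICT (by name: the statement is the Claim_ definition above) =====
theorem solution_spec : Claim_equal_solution := by
  intro new_id _
  unfold Spec_solution solution solution_alt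
  dsimp only
  have hA0 : solLoopA new_id.toList [] true false 0 = (hS (pvL new_id.toList)).take 15 := by
    simpa using (loopA_eq new_id.toList []).1
  have hB1 : (PySem.Str.lower new_id).toList.filter (fun c => !pvForb.contains c)
      = (new_id.toList.filter pvKeep).map PySem.Chars.lowerChar := by
    rw [PySem.Str.toList_lower]
    show (new_id.toList.map PySem.Chars.lowerChar).filter pvKeep = _
    rw [List.filter_map]
    congr 1
    apply List.filter_congr
    intro c _
    exact keep_lowerChar c
  rw [hA0, hB1,
    show List.map PySem.Chars.lowerChar (List.filter pvKeep new_id.toList) = pvL new_id.toList from rfl,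
    collapseDots_eq_hN, dropWhile_hN]
  set T := (hS (pvL new_id.toList)).take 15 with hTdef
  have hno : noDD T = true := noDD_take 15 _ (noDD_hNS _).2.1
  rw [rstrip_eq T hno]
  set li2 := if T.getLast? = some '.' then T.dropLast else T with h2
  by_cases hT : T = []
  · have hl2 : li2 = [] := by simp [h2, hT]
    simp [hT, hl2]
  · rw [if_neg hT]
    by_cases h3 : li2 = []
    · simp [h3]
    · rw [if_neg h3, if_neg h3, pad_eq, foldl_push]
      apply String.toList_inj.mp; simp
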